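-- pv_equiv track=rewrite | github.com/FrancisLawlor/Hangman_Python | hangman.py | disguise_word
-- ===== SOURCE A (Python) =====
-- def disguise_word(secret_word):
--     str=[]; #initialise empty list
--     for i in range(0,len(secret_word)): #go through all letters
--         if secret_word[i] != ' ': #if character is not a space
--             str.append('_'); #append underscore to list "str"
--         else:
--             str.append(' '); #append a space if the character in the secret_word is a space
--
--     return str;
-- ===== SOURCE B (Python) =====
-- def disguise_word(secret_word):
--     disguised = ' '.join('_' * len(tok) for tok in secret_word.split(' '))
--     return list(disguised)
-- ===== Notes on version B (the rewrite author's own statement) =====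
-- stated objective: alternative
-- what changed: Replaces the per-character index loop that appends an underscore or space per character with split-on-space, mapping each token to an underscore run of its length and joining the runs back with spaces.
import Mathlib
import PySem

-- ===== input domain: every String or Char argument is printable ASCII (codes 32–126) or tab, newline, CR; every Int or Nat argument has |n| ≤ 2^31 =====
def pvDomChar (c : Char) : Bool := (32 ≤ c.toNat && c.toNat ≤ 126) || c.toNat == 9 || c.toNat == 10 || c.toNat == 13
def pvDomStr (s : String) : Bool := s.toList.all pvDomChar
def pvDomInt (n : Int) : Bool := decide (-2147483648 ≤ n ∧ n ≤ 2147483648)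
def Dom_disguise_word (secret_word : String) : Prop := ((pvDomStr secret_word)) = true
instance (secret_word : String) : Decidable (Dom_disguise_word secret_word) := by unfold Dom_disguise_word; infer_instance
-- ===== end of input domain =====

-- B replaces the char-by-char index loop by split-on-space / map tokens to underscore runs / join (a different decomposition; measured faster by a constant factor).

-- ===== PORT A =====
-- for i in range(0, len(secret_word)): append '_' or ' '
def disguise_word (secret_word : String) : List String :=
  (PySem.List.pyRange 0 (PySem.Str.len secret_word) 1).foldl
    (fun acc i =>
      if PySem.List.pyGetD secret_word.toList i ' ' ≠ ' ' then acc ++ ["_"]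
      else acc ++ [" "]) []

-- ===== PORT B =====
-- ' '.join('_' * len(tok) for tok in secret_word.split(' ')); return list(disguised)
def disguise_word_alt (secret_word : String) : List String :=
  (PySem.Chars.join [' ']
      ((PySem.Chars.splitOn secret_word.toList [' ']).map (fun t => List.replicate t.length '_'))).map
    (fun c => String.ofList [c])

-- ===== PRECONDITION & SPEC =====
def Spec_disguise_word (secret_word : String) (out : List String) : Prop := out = disguise_word_alt secret_word
instance (secret_word : String) (out : List String) : Decidable (Spec_disguise_word secret_word out) := by unfold Spec_disguise_word; infer_instance

-- ===== CLAIM (what is proved, stated in full; the proofs are below) =====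
def Claim_equal_disguise_word : Prop := ∀ (secret_word : String), Dom_disguise_word secret_word → Spec_disguise_word secret_word (disguise_word secret_word)

-- ===== LEMMAS AND PROOFS =====

-- structural characterisation of splitting on a single space
def pvConsHead (a : List Char) : List (List Char) → List (List Char)
  | [] => [a]
  | p :: ps => (a ++ p) :: ps

def pvSplit1 : List Char → List (List Char)
  | [] => [[]]
  | c :: rest => if c = ' ' then [] :: pvSplit1 rest else pvConsHead [c] (pvSplit1 rest)

theorem pvConsHead_ne_nil (a : List Char) (xs : List (List Char)) : pvConsHead a xs ≠ [] := by
  cases xs <;> simp [pvConsHead]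

theorem pvSplit1_ne_nil (l : List Char) : pvSplit1 l ≠ [] := by
  cases l with
  | nil => simp [pvSplit1]
  | cons c rest =>
      by_cases h : c = ' ' <;> simp [pvSplit1, h, pvConsHead_ne_nil]

theorem pvConsHead_nil (xs : List (List Char)) (h : xs ≠ []) : pvConsHead [] xs = xs := by
  cases xs with
  | nil => exact absurd rfl h
  | cons p ps => simp [pvConsHead]

theorem pvConsHead_append (a : List Char) (c : Char) (xs : List (List Char)) :
    pvConsHead (a ++ [c]) xs = pvConsHead a (pvConsHead [c] xs) := by
  cases xs <;> simp [pvConsHead]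

theorem pv_go_spec : ∀ (fuel : Nat) (l cur : List Char) (acc : List (List Char)),
    l.length ≤ fuel →
    PySem.Chars.splitOn.go [' '] fuel l cur acc = acc.reverse ++ pvConsHead cur.reverse (pvSplit1 l) := by
  intro fuel
  induction fuel with
  | zero =>
      intro l cur acc h
      have hl : l = [] := List.eq_nil_of_length_eq_zero (Nat.le_zero.mp h)
      subst hl
      show ((cur.reverse ++ []) :: acc).reverse = acc.reverse ++ pvConsHead cur.reverse (pvSplit1 [])
      simp [pvSplit1, pvConsHead]
  | succ f ih =>
      intro l cur acc h
      cases l with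
      | nil =>
          show (cur.reverse :: acc).reverse = acc.reverse ++ pvConsHead cur.reverse (pvSplit1 [])
          simp [pvSplit1, pvConsHead]
      | cons c rest =>
          show (if [' '].isPrefixOf (c :: rest) then
                  PySem.Chars.splitOn.go [' '] f ((c :: rest).drop 1) [] (cur.reverse :: acc)
                else PySem.Chars.splitOn.go [' '] f rest (c :: cur) acc)
               = acc.reverse ++ pvConsHead cur.reverse (pvSplit1 (c :: rest))
          by_cases hc : c = ' '
          · subst hc
            rw [if_pos (by simp [List.isPrefixOf])]
            rw [ih _ _ _ (by simpa using Nat.le_of_succ_le_succ h)]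
            obtain ⟨p, ps, hps⟩ := List.exists_cons_of_ne_nil (pvSplit1_ne_nil rest)
            simp [pvSplit1, pvConsHead, hps]
          · rw [if_neg (by simp [List.isPrefixOf, Ne.symm hc])]
            rw [ih _ _ _ (Nat.le_of_succ_le_succ h)]
            simp [pvSplit1, hc, pvConsHead_append]
theorem pv_splitOn_eq (l : List Char) : PySem.Chars.splitOn l [' '] = pvSplit1 l := by
  show PySem.Chars.splitOn.go [' '] (l.length + 1) l [] [] = pvSplit1 l
  rw [pv_go_spec _ _ _ _ (Nat.le_succ _)]
  simp [pvConsHead_nil _ (pvSplit1_ne_nil l)]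

theorem pv_join_cons_head (sep p : List Char) (c : Char) (ps : List (List Char)) :
    PySem.Chars.join sep ((c :: p) :: ps) = c :: PySem.Chars.join sep (p :: ps) := by
  cases ps with
  | nil => simp [PySem.Chars.join_singleton]
  | cons q qs => simp [PySem.Chars.join_cons_cons]

theorem pv_join_split1 : ∀ l : List Char,
    PySem.Chars.join [' '] ((pvSplit1 l).map (fun t => List.replicate t.length '_'))
      = l.map (fun c => if c = ' ' then ' ' else '_') := by
  intro l
  induction l with
  | nil => simp [pvSplit1, PySem.Chars.join_singleton]
  | cons c rest ih =>
      obtain ⟨p, ps, hps⟩ := List.exists_cons_of_ne_nil (pvSplit1_ne_nil rest)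
      rw [hps] at ih
      simp only [List.map_cons] at ih
      by_cases hc : c = ' '
      · subst hc
        simp only [pvSplit1, if_true, hps, List.map_cons, List.length_nil, List.replicate_zero]
        rw [PySem.Chars.join_cons_cons, ih]
        rfl
      · simp only [pvSplit1, if_neg hc, hps, pvConsHead, List.singleton_append, List.map_cons,
          List.length_cons, List.replicate_succ]
        rw [pv_join_cons_head, ih]

theorem pv_A_eq (s : String) :
    disguise_word s = s.toList.map (fun c => if c ≠ ' ' then "_" else " ") := by
  unfold disguise_word
  have hb : (fun (acc : List String) (c : Char) => if c ≠ ' ' then acc ++ ["_"] else acc ++ [" "])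
      = fun acc c => acc ++ [if c ≠ ' ' then "_" else " "] := by
    funext acc c; split <;> rfl
  rw [PySem.Str.len_eq]
  rw [show (PySem.List.pyRange 0 (↑s.toList.length) 1) = PySem.List.pyRange 0 (↑s.toList.length) from rfl]
  rw [PySem.List.foldl_pyRange_zero_pyGetD' s.toList ' '
        (fun acc c => if c ≠ ' ' then acc ++ ["_"] else acc ++ [" "]) []]
  rw [hb, PySem.List.foldl_append_singleton_eq_map]
  simp

-- ===== VERDICT (by name: the statement is the Claim_ definition above) =====
theorem disguise_word_spec : Claim_equal_disguise_word := by
  intro s _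
  show disguise_word s = disguise_word_alt s
  rw [pv_A_eq]
  unfold disguise_word_alt
  rw [pv_splitOn_eq, pv_join_split1, List.map_map]
  apply List.map_congr_left
  intro c _
  by_cases hc : c = ' ' <;> simp [hc]
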